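-- pv_equiv track=rewrite | github.com/DMitev11/RL-Blackjack | model/utils.py | calculatePairs
-- ===== SOURCE A (Python) =====
-- def calculatePairs(values):
--     if(len(values) > 2): return []
--     cards = [value for value in values if value != -1]
--     pairs = []
--     for idx, value in enumerate(cards):
--         found_index = cards.index(value)
--         if (found_index != idx and value not in pairs):
--             pairs.append(value)
--
--     return pairs
-- ===== SOURCE B (Python) =====
-- def calculatePairs(values):
--     if len(values) == 2:
--         a, b = values
--         if a == b and a != -1:
--             return [a]
--     return []
-- ===== Notes on version B (the rewrite author's own statement) =====
-- stated objective: simpler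
-- what changed: Since the length guard means at most two cards exist, B eliminates the filter and scanning loop entirely and returns the closed-form answer: the singleton of the shared value exactly when the input is two equal non-sentinel cards, and an empty result otherwise.
import Mathlib
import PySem

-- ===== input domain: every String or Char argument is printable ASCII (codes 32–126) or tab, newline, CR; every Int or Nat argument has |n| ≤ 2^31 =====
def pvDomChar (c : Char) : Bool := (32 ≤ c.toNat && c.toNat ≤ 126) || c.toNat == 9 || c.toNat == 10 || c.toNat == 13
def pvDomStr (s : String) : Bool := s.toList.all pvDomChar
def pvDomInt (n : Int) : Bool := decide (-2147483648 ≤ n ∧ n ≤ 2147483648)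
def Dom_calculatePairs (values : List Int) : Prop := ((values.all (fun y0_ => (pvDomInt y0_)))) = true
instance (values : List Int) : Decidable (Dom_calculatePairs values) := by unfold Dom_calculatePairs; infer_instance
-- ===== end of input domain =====

-- B replaces A's filter-and-scan loop with the closed form: with at most two cards, the answer is [a] iff the input is two equal non-(-1) values (simpler).


-- ===== PORT A =====
def calculatePairs (values : List Int) : List Int :=
  if values.length > 2 then [] else
  let cards := values.filter (fun value => value ≠ -1)
  let pairs := (PySem.List.enumerate cards).foldl
    (fun (pairs : List Int) (p : Int × Int) =>
      match PySem.List.index? cards p.2 with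
      | some foundIndex =>
          if (foundIndex : Int) ≠ p.1 ∧ p.2 ∉ pairs then pairs ++ [p.2] else pairs
      | none => pairs)  -- unreachable: p.2 ∈ cards
    []
  pairs

-- ===== PORT B =====
def calculatePairs_alt (values : List Int) : List Int :=
  match values with
  | [a, b] => if a = b ∧ a ≠ -1 then [a] else []
  | _ => []

-- ===== PRECONDITION & SPEC =====
def Spec_calculatePairs (values : List Int) (out : List Int) : Prop := out = calculatePairs_alt values
instance (values : List Int) (out : List Int) : Decidable (Spec_calculatePairs values out) := by unfold Spec_calculatePairs; infer_instance

-- ===== CLAIM =====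
def Claim_equal_calculatePairs : Prop := ∀ (values : List Int), Dom_calculatePairs values → Spec_calculatePairs values (calculatePairs values)

-- ===== LEMMAS AND PROOFS =====

-- ===== VERDICT =====
theorem calculatePairs_spec : Claim_equal_calculatePairs := by
  intro values _
  unfold Spec_calculatePairs calculatePairs calculatePairs_alt
  match values with
  | [] => decide
  | [a] =>
      by_cases ha : a = -1 <;>
        simp [PySem.List.enumerate, PySem.List.index?, ha]
  | [a, b] =>
      by_cases ha : a = -1 <;> by_cases hb : b = -1 <;> by_cases hab : a = b <;>
        simp [PySem.List.enumerate, PySem.List.index?, ha, hb, hab] <;>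
        simp_all [List.idxOf?, List.findIdx?, List.findIdx?.go, beq_iff_eq]
  | a :: b :: c :: rest =>
      simp [List.length]
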